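-- pv_equiv track=rewrite | github.com/chongzicbo/KG_Tutorial | relation_extract/joint_re_bilstm_ntc/data_helper.py | sentence_label_construction
-- ===== SOURCE A (Python) =====
-- def sentence_label_construction(sentence, relation_label_1, relation_label_2, relation):
--     '''
--        combine the label for each word in each entity with the relation
--        and then combine the relation-entity label with the position of the entity in the triple
--     '''
--     element_list = sentence.split(" ")
--     dlist_1 = list(relation_label_1)
--     dlist_2 = list(relation_label_2)
--     output_list = []
--     for i in element_list:
--         if i in dlist_1:
--             output_list.append(relation + "-" + relation_label_1[i] + "-1")
--         elif i in dlist_2: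
--             output_list.append(relation + "-" + relation_label_2[i] + "-1")
--         else:
--             output_list.append("O")
--     return output_list
-- ===== SOURCE B (Python) =====
-- def sentence_label_construction(sentence, relation_label_1, relation_label_2, relation):
--     '''Start from all-'O' labels and stamp the relation-entity label onto every
--     occurrence of each entity word; label_2 first, then label_1 so it takes priority.'''
--     words = sentence.split(" ")
--     out = ["O"] * len(words)
--     for d in (relation_label_2, relation_label_1):
--         for key, val in d.items():
--             for pos, w in enumerate(words):
--                 if w == key:
--                     out[pos] = relation + "-" + val + "-1"
--     return out
-- ===== Notes on version B (the rewrite author's own statement) =====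
-- stated objective: alternative
-- what changed: Instead of scanning both key lists for every word, B initialises all labels to 'O' and iterates over the dict entries (label_2 first, then label_1 for priority), stamping the relation-entity label onto every occurrence of each key word.
import Mathlib
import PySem

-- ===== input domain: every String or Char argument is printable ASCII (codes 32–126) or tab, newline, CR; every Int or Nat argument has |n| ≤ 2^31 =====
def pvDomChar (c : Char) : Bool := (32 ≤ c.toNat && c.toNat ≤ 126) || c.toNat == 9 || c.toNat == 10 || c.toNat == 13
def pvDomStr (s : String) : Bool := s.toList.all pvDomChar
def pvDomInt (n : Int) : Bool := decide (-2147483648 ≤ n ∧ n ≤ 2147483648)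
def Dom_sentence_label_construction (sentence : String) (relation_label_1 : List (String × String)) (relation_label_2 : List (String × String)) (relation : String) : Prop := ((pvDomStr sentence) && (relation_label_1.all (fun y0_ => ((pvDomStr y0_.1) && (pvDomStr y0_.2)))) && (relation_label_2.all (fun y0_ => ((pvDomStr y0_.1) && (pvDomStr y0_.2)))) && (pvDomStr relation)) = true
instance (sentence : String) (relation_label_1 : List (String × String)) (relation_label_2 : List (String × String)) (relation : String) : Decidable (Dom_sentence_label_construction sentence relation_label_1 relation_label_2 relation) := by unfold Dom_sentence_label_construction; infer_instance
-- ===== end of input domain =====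

-- B replaces A's per-word scans of both key lists by an all-'O' initialisation that is
-- overwritten per dict entry (label_2 pass, then label_1 pass for priority); alternative
-- decomposition, same result.


-- ===== PORT A =====
-- literal port of A: per word, membership test against the key lists, elif the second
-- dict, else "O"; the dict parameters become PySem.Dict via ofList (Python dict(pairs):
-- last value wins, first position kept); after a successful membership test the lookup
-- relation_label_k[i] cannot miss, so it is ported as getD with an unreachable default.
def sentence_label_construction (sentence : String) (relation_label_1 : List (String × String)) (relation_label_2 : List (String × String)) (relation : String) : List String :=
  let element_list := (PySem.Str.split? sentence " ").getD []
  let d1 : PySem.Dict String String := PySem.Dict.ofList relation_label_1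
  let d2 : PySem.Dict String String := PySem.Dict.ofList relation_label_2
  let dlist_1 := d1.keys
  let dlist_2 := d2.keys
  element_list.foldl (fun output_list i =>
    if dlist_1.contains i then
      output_list ++ [relation ++ "-" ++ d1.getD i "" ++ "-1"]
    else if dlist_2.contains i then
      output_list ++ [relation ++ "-" ++ d2.getD i "" ++ "-1"]
    else
      output_list ++ ["O"]) []

-- ===== PORT B =====
-- port of B's inner loop: 'for pos, w in enumerate(words): if w == key: out[pos] = lab'
def pvStamp (words : List String) (key lab : String) (out : List String) : List String :=
  (PySem.List.enumerate words 0).foldl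
    (fun o pw => if pw.2 == key then o.set pw.1.toNat lab else o) out

-- port of B: all-'O' initialisation, then one pass over each dict's items (label_2
-- first, then label_1 overrides), stamping the label onto every occurrence of the key.
def sentence_label_construction_alt (sentence : String) (relation_label_1 : List (String × String)) (relation_label_2 : List (String × String)) (relation : String) : List String :=
  let words := (PySem.Str.split? sentence " ").getD []
  let out0 : List String := PySem.List.pyRepeat ["O"] (words.length : Int)
  let pass := fun (out : List String) (d : PySem.Dict String String) =>
    d.items.foldl (fun out kv =>
      pvStamp words kv.1 (relation ++ "-" ++ kv.2 ++ "-1") out) out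
  pass (pass out0 (PySem.Dict.ofList relation_label_2)) (PySem.Dict.ofList relation_label_1)

-- ===== PRECONDITION & SPEC =====
def Spec_sentence_label_construction (sentence : String) (relation_label_1 : List (String × String)) (relation_label_2 : List (String × String)) (relation : String) (out : List String) : Prop := out = sentence_label_construction_alt sentence relation_label_1 relation_label_2 relation
instance (sentence : String) (relation_label_1 : List (String × String)) (relation_label_2 : List (String × String)) (relation : String) (out : List String) : Decidable (Spec_sentence_label_construction sentence relation_label_1 relation_label_2 relation out) := by unfold Spec_sentence_label_construction; infer_instance

-- ===== CLAIM (what is proved, stated in full; the proofs are below) =====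
def Claim_equal_sentence_label_construction : Prop := ∀ (sentence : String) (relation_label_1 : List (String × String)) (relation_label_2 : List (String × String)) (relation : String), Dom_sentence_label_construction sentence relation_label_1 relation_label_2 relation → Spec_sentence_label_construction sentence relation_label_1 relation_label_2 relation (sentence_label_construction sentence relation_label_1 relation_label_2 relation)

-- ===== LEMMAS AND PROOFS =====

-- the stamping fold keeps the length of out
lemma foldl_set_length (key lab : String) :
    ∀ (l : List (Int × String)) (out : List String),
    (l.foldl (fun o pw => if pw.2 == key then o.set pw.1.toNat lab else o) out).length = out.length := by
  intro l
  induction l with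
  | nil => intro out; rfl
  | cons p t ih =>
    intro out
    simp only [List.foldl_cons]
    rw [ih]
    by_cases h : p.2 == key <;> simp [h]

lemma pvStamp_length (words : List String) (key lab : String) (out : List String) :
    (pvStamp words key lab out).length = out.length :=
  foldl_set_length key lab _ out

-- pointwise effect of the stamping fold, generalised over the enumerate start s
lemma pvStamp_getElem?_aux (key lab : String) :
    ∀ (words : List String) (s : Nat) (out : List String), s + words.length ≤ out.length → ∀ (i : Nat),
    ((PySem.List.enumerate words (s : Int)).foldl
      (fun o pw => if pw.2 == key then o.set pw.1.toNat lab else o) out)[i]? =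
      if s ≤ i ∧ words[i - s]? = some key then some lab else out[i]? := by
  intro words
  induction words with
  | nil =>
    intro s out _ i
    simp [PySem.List.enumerate_nil]
  | cons w t ih =>
    intro s out hlen i
    simp only [List.length_cons] at hlen
    rw [PySem.List.enumerate_cons]
    simp only [List.foldl_cons]
    have hcast : (s : Int) + 1 = ((s + 1 : Nat) : Int) := by push_cast; ring
    have htoNat : (s : Int).toNat = s := by simp
    set out1 : List String := if w == key then out.set (s:Int).toNat lab else out with hout1
    have hlen1 : out1.length = out.length := by
      rw [hout1]; by_cases h : w == key <;> simp [h]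
    rw [hcast, ih (s+1) out1 (by omega) i]
    have hkeep : i ≠ s → out1[i]? = out[i]? := by
      intro hne
      rw [hout1]
      by_cases h : w == key
      · rw [if_pos h, htoNat, List.getElem?_set_ne (fun hc => hne hc.symm)]
      · rw [if_neg h]
    by_cases h1 : s + 1 ≤ i ∧ t[i - (s+1)]? = some key
    · rw [if_pos h1, if_pos]
      refine ⟨by omega, ?_⟩
      have hix : i - s = (i - (s+1)) + 1 := by omega
      rw [hix]
      simpa using h1.2
    · rw [if_neg h1]
      rcases Nat.lt_trichotomy i s with hlt | heq | hgt
      · rw [if_neg (by omega), hkeep (by omega)]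
      · rw [hout1, heq, htoNat, Nat.sub_self]
        by_cases h : w == key
        · rw [if_pos h, if_pos ⟨le_rfl, by simpa using (beq_iff_eq.mp h)⟩,
            List.getElem?_set_self (by omega)]
        · rw [if_neg h, if_neg]
          rintro ⟨-, hc⟩
          simp only [List.getElem?_cons_zero, Option.some.injEq] at hc
          exact h (beq_iff_eq.mpr hc)
      · have ht : ¬ t[i - (s+1)]? = some key := fun hc => h1 ⟨by omega, hc⟩
        rw [hkeep (by omega), if_neg]
        rintro ⟨-, hc⟩
        have hix : i - s = (i - (s+1)) + 1 := by omega
        rw [hix] at hc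
        simp only [List.getElem?_cons_succ] at hc
        exact ht hc

lemma pvStamp_getElem? (key lab : String) (words out : List String)
    (hlen : out.length = words.length) (i : Nat) :
    (pvStamp words key lab out)[i]? =
      if words[i]? = some key then some lab else out[i]? := by
  have h := pvStamp_getElem?_aux key lab words 0 out (by omega) i
  simp only [Nat.cast_zero, Nat.zero_le, true_and, Nat.sub_zero] at h
  exact h

-- pointwise effect of one pass over a list of (key, value) pairs with distinct keys
lemma pass_getElem? (relation : String) (words : List String) :
    ∀ (l : List (String × String)), (l.map Prod.fst).Nodup →
    ∀ (out : List String), out.length = words.length → ∀ (i : Nat),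
    (l.foldl (fun out kv => pvStamp words kv.1 (relation ++ "-" ++ kv.2 ++ "-1") out) out)[i]? =
      match l.find? (fun kv => words[i]? == some kv.1) with
      | some kv => some (relation ++ "-" ++ kv.2 ++ "-1")
      | none => out[i]? := by
  intro l
  induction l with
  | nil => intro _ out _ i; rfl
  | cons kv t ih =>
    intro hnd out hlen i
    simp only [List.map_cons, List.nodup_cons] at hnd
    simp only [List.foldl_cons]
    rw [ih hnd.2 _ ((pvStamp_length _ _ _ _).trans hlen) i]
    by_cases hw : words[i]? = some kv.1
    · rw [List.find?_cons_of_pos (by simpa using hw)]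
      have hnone : t.find? (fun p => words[i]? == some p.1) = none := by
        rw [List.find?_eq_none]
        intro p hp hc
        simp only [hw, beq_iff_eq, Option.some.injEq] at hc
        exact hnd.1 (hc ▸ (List.mem_map.mpr ⟨p, hp, rfl⟩))
      rw [hnone]
      rw [pvStamp_getElem? _ _ _ _ hlen i, if_pos hw]
    · rw [List.find?_cons_of_neg (by simpa using hw)]
      rcases hfind : t.find? (fun p => words[i]? == some p.1) with _ | p
      · rw [hfind, pvStamp_getElem? _ _ _ _ hlen i, if_neg hw]
      · rw [hfind]

lemma pass_length (relation : String) (words : List String) (l : List (String × String))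
    (out : List String) :
    (l.foldl (fun out kv => pvStamp words kv.1 (relation ++ "-" ++ kv.2 ++ "-1") out) out).length
      = out.length := by
  induction l generalizing out with
  | nil => rfl
  | cons kv t ih => simp only [List.foldl_cons]; rw [ih, pvStamp_length]

-- items.find? on a nodup-key dict, rephrased through contains/getD
lemma dict_find?_items (d : PySem.Dict String String) (hnd : d.keys.Nodup) (w : String)
    (relation : String) (x : Option String) :
    (match d.items.find? (fun kv => some w == some kv.1) with
      | some kv => some (relation ++ "-" ++ kv.2 ++ "-1")
      | none => x) =
      if d.contains w then some (relation ++ "-" ++ d.getD w "" ++ "-1") else x := by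
  rcases hf : d.items.find? (fun kv => some w == some kv.1) with _ | kv
  · rw [hf, if_neg]
    intro hc
    rw [PySem.Dict.contains_iff_mem_keys _ _] at hc
    rcases List.mem_map.mp hc with ⟨p, hp, hpk⟩
    exact absurd (by simp [hpk]) (List.find?_eq_none.mp hf p hp)
  · rw [hf]
    have hmem := List.find?_some hf
    have hin := List.mem_of_find?_eq_some hf
    simp only [beq_iff_eq, Option.some.injEq] at hmem
    have hkv : (w, kv.2) ∈ d.items := by rw [hmem, Prod.mk.eta]; exact hin
    rw [if_pos ((PySem.Dict.contains_iff_mem_keys _ _).mpr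
          (List.mem_map.mpr ⟨(w, kv.2), hkv, rfl⟩)),
      PySem.Dict.getD_of_mem_items _ hkv hnd ""]

-- ===== VERDICT (by name: the statement is the Claim_ definition above) =====
theorem sentence_label_construction_spec : Claim_equal_sentence_label_construction := by
  intro sentence relation_label_1 relation_label_2 relation _
  unfold Spec_sentence_label_construction
  simp only [sentence_label_construction, sentence_label_construction_alt]
  set words := (PySem.Str.split? sentence " ").getD [] with hwords
  set d1 : PySem.Dict String String := PySem.Dict.ofList relation_label_1 with hd1
  set d2 : PySem.Dict String String := PySem.Dict.ofList relation_label_2 with hd2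
  have nd1 : d1.keys.Nodup := PySem.Dict.nodup_keys_ofList relation_label_1
  have nd2 : d2.keys.Nodup := PySem.Dict.nodup_keys_ofList relation_label_2
  -- A's loop body always appends one element: it is a map over the words
  have hbody : (fun (output_list : List String) (i : String) =>
      if d1.keys.contains i then output_list ++ [relation ++ "-" ++ d1.getD i "" ++ "-1"]
      else if d2.keys.contains i then output_list ++ [relation ++ "-" ++ d2.getD i "" ++ "-1"]
      else output_list ++ ["O"]) = (fun acc x => acc ++ [(fun i =>
      if d1.keys.contains i then relation ++ "-" ++ d1.getD i "" ++ "-1"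
      else if d2.keys.contains i then relation ++ "-" ++ d2.getD i "" ++ "-1"
      else "O") x]) := by
    funext acc x
    by_cases h1 : x ∈ d1.keys <;> by_cases h2 : x ∈ d2.keys <;> simp [h1, h2]
  rw [hbody, PySem.List.foldl_append_singleton_eq_map, List.nil_append]
  -- lengths on B's side
  have hlen0 : (PySem.List.pyRepeat ["O"] (words.length : Int)).length = words.length := by
    rw [PySem.List.pyRepeat_singleton, List.length_replicate, Int.toNat_natCast]
  have hlen2 : (d2.items.foldl (fun out kv =>
      pvStamp words kv.1 (relation ++ "-" ++ kv.2 ++ "-1") out)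
      (PySem.List.pyRepeat ["O"] (words.length : Int))).length = words.length := by
    rw [pass_length, hlen0]
  -- keys are the first components of items
  have nd1' : (d1.items.map Prod.fst).Nodup := nd1
  have nd2' : (d2.items.map Prod.fst).Nodup := nd2
  apply List.ext_getElem?
  intro i
  rw [pass_getElem? relation words d1.items nd1' _ hlen2 i]
  by_cases hi : i < words.length
  · have hw : words[i]? = some words[i] := List.getElem?_eq_getElem hi
    rw [hw, dict_find?_items d1 nd1 words[i] relation _,
      pass_getElem? relation words d2.items nd2' _ hlen0 i, hw,
      dict_find?_items d2 nd2 words[i] relation _,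
      List.getElem?_map, hw]
    have hrep : (PySem.List.pyRepeat ["O"] (words.length : Int))[i]? = some "O" := by
      rw [PySem.List.pyRepeat_singleton, List.getElem?_replicate, if_pos (by simpa using hi)]
    rw [hrep]
    simp only [Option.map_some]
    by_cases h1 : d1.contains words[i] = true
    · have : d1.keys.contains words[i] = true := by
        simpa using (PySem.Dict.contains_iff_mem_keys d1 words[i]).mp h1
      rw [if_pos h1, if_pos this]
    · have h1' : d1.keys.contains words[i] = false := by
        rw [Bool.eq_false_iff]
        intro hc
        exact h1 ((PySem.Dict.contains_iff_mem_keys d1 words[i]).mpr (by simpa using hc))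
      rw [if_neg h1, if_neg (by simpa using h1')]
      by_cases h2 : d2.contains words[i] = true
      · have : d2.keys.contains words[i] = true := by
          simpa using (PySem.Dict.contains_iff_mem_keys d2 words[i]).mp h2
        rw [if_pos h2, if_pos this]
      · have h2' : d2.keys.contains words[i] = false := by
          rw [Bool.eq_false_iff]
          intro hc
          exact h2 ((PySem.Dict.contains_iff_mem_keys d2 words[i]).mpr (by simpa using hc))
        rw [if_neg h2, if_neg (by simpa using h2')]
  · have hw : words[i]? = none := List.getElem?_eq_none (by omega)
    have hnone1 : d1.items.find? (fun kv => words[i]? == some kv.1) = none :=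
      List.find?_eq_none.mpr (fun p _ => by simp [hw])
    have hnone2 : d2.items.find? (fun kv => words[i]? == some kv.1) = none :=
      List.find?_eq_none.mpr (fun p _ => by simp [hw])
    rw [hnone1, pass_getElem? relation words d2.items nd2' _ hlen0 i, hnone2]
    rw [PySem.List.pyRepeat_singleton, List.getElem?_replicate,
      if_neg (by simpa using (by omega : ¬ i < words.length)), List.getElem?_map, hw]
    rfl
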